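-- pv_equiv track=rewrite | github.com/bielupc/ap2 | jutge/grafs/xarxa.py | bfs
-- ===== SOURCE A (Python) =====
-- import collections
--
-- def bfs(G: dict[str, list[str]], s: str, k: int) -> int:
--
--   counter = 0
--   dst = 0
--
--   visited = {node: False for node in G}
--
--   Q = collections.deque([(s, 0)])
--   visited[s] = True
--
--   while Q:
--     u, dist = Q.popleft()
--
--     if dist == k:
--       counter  += 1
--
--     if dist > k:
--       break
--
--     for v in G[u]:
--       if not visited[v]:
--         visited[v] = True
--         Q.append((v, dist+1))
--   return counter
-- ===== SOURCE B (Python) =====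
-- def bfs(G: dict[str, list[str]], s: str, k: int) -> int:
--     if k < 0:
--         return 0
--     visited = {s}
--     frontier = [s]
--     for _ in range(k):
--         nxt = []
--         for u in frontier:
--             for v in G[u]:
--                 if v not in visited:
--                     visited.add(v)
--                     nxt.append(v)
--         frontier = nxt
--     return len(frontier)
-- ===== Notes on version B (the rewrite author's own statement) =====
-- stated objective: alternative
-- what changed: Replaces the distance-tagged deque BFS (with per-pop counting and a dist>k break) by a level-synchronous BFS that rebuilds a frontier list k times over a visited set and returns the last frontier's length.
-- outside the precondition, e.g. on bfs({'a': [], 'x': ['z']}, 'a', 0): A returns 1, B returns 1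
import Mathlib
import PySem

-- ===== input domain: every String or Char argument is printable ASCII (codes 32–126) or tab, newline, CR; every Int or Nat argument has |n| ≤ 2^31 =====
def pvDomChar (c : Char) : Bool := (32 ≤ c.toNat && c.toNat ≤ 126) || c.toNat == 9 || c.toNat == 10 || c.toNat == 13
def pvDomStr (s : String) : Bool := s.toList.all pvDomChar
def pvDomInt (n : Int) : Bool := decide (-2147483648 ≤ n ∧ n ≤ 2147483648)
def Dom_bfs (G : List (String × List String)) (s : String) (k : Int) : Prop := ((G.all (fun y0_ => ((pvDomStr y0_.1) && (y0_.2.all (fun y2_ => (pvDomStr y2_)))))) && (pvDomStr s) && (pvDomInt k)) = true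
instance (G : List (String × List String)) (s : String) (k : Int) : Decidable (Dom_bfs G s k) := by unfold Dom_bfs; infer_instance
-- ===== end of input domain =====

-- B rewrites A's distance-tagged deque BFS as a level-synchronous frontier BFS (alternative decomposition, same cost).
-- Under Pre_bfs every dict lookup of A succeeds; A's visited dict of booleans is modelled by the set of True-marked
-- nodes, and a missing adjacency lookup (Python KeyError, excluded by Pre_bfs) is modelled by an empty neighbour list.

-- ===== PORT A =====
-- inner 'for v in G[u]' loop of A: append unvisited neighbours to the queue tagged dist+1 and mark them
def bfsStepA (dist : Int) (qv : List (String × Int) × PySem.Set String) (nbrs : List String) :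
    List (String × Int) × PySem.Set String :=
  nbrs.foldl (fun qv v => if v ∈ qv.2 then qv else (qv.1 ++ [(v, dist + 1)], PySem.Set.add qv.2 v)) qv

-- every node the loop ever marks or enqueues beyond the start is a listed neighbour (used only for termination)
theorem bfsStepA_measure (G : List (String × List String)) (dist : Int)
    (Q : List (String × Int)) (V : PySem.Set String) (nbrs : List String)
    (h : ∀ v ∈ nbrs, v ∈ G.flatMap (fun p => p.2)) :
    (bfsStepA dist (Q, V) nbrs).1.length
      + ((G.flatMap (fun p => p.2)).toFinset \ (bfsStepA dist (Q, V) nbrs).2.toFinset).card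
    ≤ Q.length + ((G.flatMap (fun p => p.2)).toFinset \ V.toFinset).card := by
  induction nbrs generalizing Q V with
  | nil => simp [bfsStepA]
  | cons v vs ih =>
    have hv : v ∈ G.flatMap (fun p => p.2) := h v (List.mem_cons_self ..)
    have hvs : ∀ w ∈ vs, w ∈ G.flatMap (fun p => p.2) := fun w hw => h w (List.mem_cons_of_mem _ hw)
    by_cases hmem : v ∈ V
    · simpa [bfsStepA, hmem] using ih _ _ hvs
    · have hcard : ((G.flatMap (fun p => p.2)).toFinset \ (V ++ [v]).toFinset).card + 1
          ≤ ((G.flatMap (fun p => p.2)).toFinset \ V.toFinset).card := by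
        have hm : v ∈ (G.flatMap (fun p => p.2)).toFinset \ V.toFinset := by
          simp [Finset.mem_sdiff, List.mem_toFinset, hv, hmem]
        have hins : (V ++ [v]).toFinset = insert v V.toFinset := by
          ext x; simp
        have hpos : 0 < ((G.flatMap (fun p => p.2)).toFinset \ V.toFinset).card :=
          Finset.card_pos.mpr ⟨v, hm⟩
        rw [hins, Finset.sdiff_insert, Finset.card_erase_of_mem hm]
        omega
      calc (bfsStepA dist (Q, V) (v :: vs)).1.length
            + ((G.flatMap (fun p => p.2)).toFinset \ (bfsStepA dist (Q, V) (v :: vs)).2.toFinset).card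
          = (bfsStepA dist (Q ++ [(v, dist + 1)], V ++ [v]) vs).1.length
            + ((G.flatMap (fun p => p.2)).toFinset \ (bfsStepA dist (Q ++ [(v, dist + 1)], V ++ [v]) vs).2.toFinset).card := by
            simp [bfsStepA, hmem]
        _ ≤ (Q ++ [(v, dist + 1)]).length + ((G.flatMap (fun p => p.2)).toFinset \ (V ++ [v]).toFinset).card := ih _ _ hvs
        _ ≤ Q.length + ((G.flatMap (fun p => p.2)).toFinset \ V.toFinset).card := by
            simp only [List.length_append, List.length_cons, List.length_nil]
            omega

theorem bfs_mem_flatMap_of_get? (G : List (String × List String)) (u v : String)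
    (hv : v ∈ (PySem.Dict.get? (PySem.Dict.mk G) u).getD []) : v ∈ G.flatMap (fun p => p.2) := by
  induction G with
  | nil => simp [PySem.Dict.get?] at hv
  | cons p rest ih =>
    rw [show (PySem.Dict.mk (p :: rest)) = PySem.Dict.mk ((p.1, p.2) :: rest) by rfl] at hv
    rw [PySem.Dict.get?_mk_cons] at hv
    by_cases hp : (p.1 == u) = true
    · simp only [hp, if_pos] at hv
      exact List.mem_flatMap.mpr ⟨p, List.mem_cons_self .., hv⟩
    · simp only [hp] at hv
      simp only [Bool.false_eq_true, if_false] at hv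
      exact List.mem_flatMap_of_mem (List.mem_cons_of_mem _ (List.mem_flatMap.mp (ih hv)).choose_spec.1)
        (List.mem_flatMap.mp (ih hv)).choose_spec.2

-- A's 'while Q' loop; terminates because each iteration pops one entry and enqueues only newly marked listed neighbours
def bfsLoopA (G : List (String × List String)) (k : Int) (Q : List (String × Int))
    (V : PySem.Set String) (c : Int) : Int :=
  match Q with
  | [] => c
  | (u, dist) :: Qt =>
    let c' : Int := if dist == k then c + 1 else c
    if dist > k then c'
    else
      bfsLoopA G k (bfsStepA dist (Qt, V) ((PySem.Dict.get? (PySem.Dict.mk G) u).getD [])).1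
        (bfsStepA dist (Qt, V) ((PySem.Dict.get? (PySem.Dict.mk G) u).getD [])).2 c'
termination_by Q.length + ((G.flatMap (fun p => p.2)).toFinset \ V.toFinset).card
decreasing_by
  have h := bfsStepA_measure G dist Qt V ((PySem.Dict.get? (PySem.Dict.mk G) u).getD [])
    (fun v hv => bfs_mem_flatMap_of_get? G u v hv)
  simp only [List.length_cons]
  omega

def bfs (G : List (String × List String)) (s : String) (k : Int) : Int :=
  bfsLoopA G k [(s, 0)] (PySem.Set.add PySem.Set.empty s) 0

-- ===== PORT B =====
-- inner 'for v in G[u]' loop of B: collect unvisited neighbours into the next frontier and mark them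
def bfsStepB (G : List (String × List String)) (fv : List String × PySem.Set String) (u : String) :
    List String × PySem.Set String :=
  ((PySem.Dict.get? (PySem.Dict.mk G) u).getD []).foldl
    (fun fv v => if v ∈ fv.2 then fv else (fv.1 ++ [v], PySem.Set.add fv.2 v)) fv

-- B's 'for _ in range(k)' loop over levels
def bfsLevels (G : List (String × List String)) : Nat → List String → PySem.Set String → Int
  | 0, frontier, _ => frontier.length
  | j + 1, frontier, V =>
    bfsLevels G j (frontier.foldl (bfsStepB G) ([], V)).1 (frontier.foldl (bfsStepB G) ([], V)).2

def bfs_alt (G : List (String × List String)) (s : String) (k : Int) : Int :=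
  if k < 0 then 0 else bfsLevels G k.toNat [s] (PySem.Set.ofList [s])

-- ===== PRECONDITION & SPEC =====
-- Pre_bfs excludes inputs with k ≥ 0 on which the start node or some listed neighbour is not a key of G: there A can
-- raise KeyError (at visited[v] or G[u]); the exclusion is a safe closed-form over-restriction — on a graph whose
-- dangling part lies beyond the explored levels A still returns (see the cite), and B returns the same value there.
def Pre_bfs (G : List (String × List String)) (s : String) (k : Int) : Prop :=
  k < 0 ∨ (s ∈ G.map Prod.fst ∧ ∀ p ∈ G, ∀ v ∈ p.2, v ∈ G.map Prod.fst)
instance (G : List (String × List String)) (s : String) (k : Int) : Decidable (Pre_bfs G s k) := by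
  unfold Pre_bfs; infer_instance

def pvWitness_bfs : (List (String × List String)) × String × Int :=
  ([("a", ["b", "c"]), ("b", ["c"]), ("c", [])], "a", 1)

def Spec_bfs (G : List (String × List String)) (s : String) (k : Int) (out : Int) : Prop := out = bfs_alt G s k
instance (G : List (String × List String)) (s : String) (k : Int) (out : Int) : Decidable (Spec_bfs G s k out) := by unfold Spec_bfs; infer_instance

-- ===== CLAIM (what is proved, stated in full; the proofs are below) =====
def Claim_equal_bfs : Prop := ∀ (G : List (String × List String)) (s : String) (k : Int), Dom_bfs G s k → Pre_bfs G s k → Spec_bfs G s k (bfs G s k)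

-- ===== LEMMAS AND PROOFS =====

-- A's inner loop, run on a queue of leftover level-d entries followed by partial next-level entries,
-- is B's inner loop on the node lists
theorem stepA_eq_stepB (G : List (String × List String)) (u : String) (dist : Int)
    (Q : List (String × Int)) (P : List String) (V : PySem.Set String) :
    bfsStepA dist (Q ++ P.map (fun v => (v, dist + 1)), V) ((PySem.Dict.get? (PySem.Dict.mk G) u).getD [])
      = (Q ++ (bfsStepB G (P, V) u).1.map (fun v => (v, dist + 1)), (bfsStepB G (P, V) u).2) := by
  unfold bfsStepB
  generalize (PySem.Dict.get? (PySem.Dict.mk G) u).getD [] = nbrs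
  induction nbrs generalizing P V with
  | nil => simp [bfsStepA]
  | cons v vs ih =>
    by_cases hmem : v ∈ V
    · simpa [bfsStepA, List.foldl_cons, hmem] using ih P V
    · have := ih (P ++ [v]) (PySem.Set.add V v)
      simp only [bfsStepA, List.foldl_cons, if_neg hmem, List.map_append, List.map_cons,
        List.map_nil, List.append_assoc] at this ⊢
      exact this

-- consuming one whole level d < k of the queue performs B's frontier expansion
theorem levelA (G : List (String × List String)) (k d : Int) (hd : d < k)
    (F P : List String) (V : PySem.Set String) (c : Int) :
    bfsLoopA G k (F.map (fun v => (v, d)) ++ P.map (fun v => (v, d + 1))) V c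
      = bfsLoopA G k ((F.foldl (bfsStepB G) (P, V)).1.map (fun v => (v, d + 1)))
          (F.foldl (bfsStepB G) (P, V)).2 c := by
  induction F generalizing P V with
  | nil => simp
  | cons u F ih =>
    rw [List.map_cons, List.cons_append, bfsLoopA]
    have h1 : (d == k) = false := by simp only [beq_eq_false_iff_ne, ne_eq]; omega
    simp only [h1, Bool.false_eq_true, if_false, if_neg (not_lt.mpr hd.le),
      stepA_eq_stepB G u d (F.map (fun v => (v, d))) P V, List.foldl_cons]
    exact ih (bfsStepB G (P, V) u).1 (bfsStepB G (P, V) u).2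

-- at level k the loop counts exactly the level's nodes and then stops
theorem finalA (G : List (String × List String)) (k : Int) (_hk : 0 ≤ k)
    (F P : List String) (V : PySem.Set String) (c : Int) :
    bfsLoopA G k (F.map (fun v => (v, k)) ++ P.map (fun v => (v, k + 1))) V c = c + F.length := by
  induction F generalizing P V c with
  | nil =>
    cases P with
    | nil => simp [bfsLoopA]
    | cons p P =>
      rw [List.map_nil, List.nil_append, List.map_cons, bfsLoopA]
      have h1 : (k + 1 == k) = false := by simp only [beq_eq_false_iff_ne, ne_eq]; omega
      simp only [h1, Bool.false_eq_true, if_false, if_pos (by omega : k + 1 > k),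
        List.length_nil, Nat.cast_zero, add_zero]
  | cons u F ih =>
    rw [List.map_cons, List.cons_append, bfsLoopA]
    have h1 : (k == k) = true := by simp
    simp only [h1, if_true, if_neg (lt_irrefl k),
      stepA_eq_stepB G u k (F.map (fun v => (v, k))) P V]
    rw [ih (bfsStepB G (P, V) u).1 (bfsStepB G (P, V) u).2 (c + 1)]
    simp only [List.length_cons]
    push_cast
    ring

-- the whole loop, started j levels below k, returns the counter plus B's level-j frontier size
theorem mainA (G : List (String × List String)) (k : Int) (j : Nat) (hj : (j : Int) ≤ k)
    (F : List String) (V : PySem.Set String) (c : Int) :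
    bfsLoopA G k (F.map (fun v => (v, k - j))) V c = c + bfsLevels G j F V := by
  induction j generalizing F V c with
  | zero =>
    have h0 : k - ((0 : Nat) : Int) = k := by simp
    rw [h0, bfsLevels]
    have := finalA G k (by exact_mod_cast hj) F [] V c
    simpa using this
  | succ j ih =>
    have hd : k - ((j + 1 : Nat) : Int) < k := by push_cast; omega
    have hstep := levelA G k (k - ((j + 1 : Nat) : Int)) hd F [] V c
    simp only [List.map_nil, List.append_nil] at hstep
    have harg : k - ((j + 1 : Nat) : Int) + 1 = k - (j : Nat) := by push_cast; ring
    rw [harg] at hstep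
    rw [hstep, ih (by push_cast at hj ⊢; omega) (F.foldl (bfsStepB G) ([], V)).1
      (F.foldl (bfsStepB G) ([], V)).2 c, bfsLevels]

-- ===== VERDICT (by name: the statement is the Claim_ definition above) =====
theorem bfs_spec : Claim_equal_bfs := by
  intro G s k _ _
  unfold Spec_bfs bfs bfs_alt
  by_cases hk : k < 0
  · rw [bfsLoopA]
    have h0 : ((0 : Int) == k) = false := by simp; omega
    simp only [h0, Bool.false_eq_true, if_false, if_pos hk]
  · have hk0 : 0 ≤ k := le_of_not_gt hk
    have hkk : k - (k.toNat : Int) = 0 := by omega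
    have := mainA G k k.toNat (by omega) [s] (PySem.Set.ofList [s]) 0
    rw [hkk] at this
    simp only [List.map_cons, List.map_nil] at this
    rw [if_neg hk]
    calc bfsLoopA G k [(s, 0)] (PySem.Set.add PySem.Set.empty s) 0
        = bfsLoopA G k [(s, 0)] (PySem.Set.ofList [s]) 0 := rfl
      _ = 0 + bfsLevels G k.toNat [s] (PySem.Set.ofList [s]) := this
      _ = bfsLevels G k.toNat [s] (PySem.Set.ofList [s]) := by omega
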